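-- pv_equiv track=rewrite | github.com/owy1/code-katas | src/string_pyramid.py | watch_pyramid_from_above
-- ===== SOURCE A (Python) =====
-- def watch_pyramid_from_above(characters):
--     """Show pyramid top-view."""
--     if not characters: return characters
--     reverse_str = (characters[::-1])[1:]
--     n = len(characters)
--     head = ""
--     tail = ""
--     matrix = ""
--     k = 2 * n - 2
--     for idx, item in enumerate(characters):
--         matrix += head
--         for j in range(k + 1):
--             matrix += item
--         matrix += tail
--         matrix += "\n"
--         head = head + item
--         tail = item + tail
--         k = k - 2
--     head = characters[:-1]
--     tail = reverse_str
--     k = 1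
--     for idx, item in enumerate(reverse_str):
--         matrix += head
--         for j in range(k):
--             matrix += item
--         matrix += tail
--         matrix += "\n"
--         head = head[:-1]
--         tail = tail[1:]
--         k = k + 2
--     return matrix[:-1]
-- ===== SOURCE B (Python) =====
-- def watch_pyramid_from_above(characters):
--     """Show pyramid top-view."""
--     if not characters:
--         return characters
--     size = 2 * len(characters) - 1
--     rows = []
--     for i in range(size):
--         m = min(i, size - 1 - i)
--         prefix = characters[:m]
--         rows.append(prefix + characters[m] * (size - 2 * m) + prefix[::-1])
--     return "\n".join(rows)
-- ===== Notes on version B (the rewrite author's own statement) =====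
-- stated objective: faster
-- what changed: Replaces A's incremental head/tail state threaded through two half-loops by a single uniform loop that builds each row independently from the closed-form concentric-ring index m = min(i, size-1-i) (prefix + ring char repeated + mirrored prefix), then ' '.join; rows are built with bulk slice/repeat operations instead of A's per-character inner loop.
import Mathlib
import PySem

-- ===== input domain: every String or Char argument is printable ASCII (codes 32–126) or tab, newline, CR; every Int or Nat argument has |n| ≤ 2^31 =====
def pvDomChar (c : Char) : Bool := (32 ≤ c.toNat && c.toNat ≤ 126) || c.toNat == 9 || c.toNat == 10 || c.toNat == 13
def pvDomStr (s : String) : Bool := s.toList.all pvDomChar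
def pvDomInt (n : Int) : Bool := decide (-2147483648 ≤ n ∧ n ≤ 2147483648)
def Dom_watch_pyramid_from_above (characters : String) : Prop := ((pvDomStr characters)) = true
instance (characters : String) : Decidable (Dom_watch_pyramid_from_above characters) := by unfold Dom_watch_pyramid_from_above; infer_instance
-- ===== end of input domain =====

-- B replaces A's incremental head/tail prefix-suffix construction over two half-loops by a
-- single uniform loop building each row independently from the closed-form concentric-ring
-- index m = min(i, size-1-i); measured faster by a constant factor (bulk slice/repeat per row
-- instead of A's per-character inner loop).

-- ===== PORT A =====
-- A-side helper: the body of A's first 'for idx, item in enumerate(characters)' loop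
-- (idx is never used, so the fold is over the characters themselves);
-- state = (head, tail, matrix, k), all strings kept as List Char, k the Python int.
def pvAStep1 (st : List Char × List Char × List Char × Int) (item : Char) :
    List Char × List Char × List Char × Int :=
  match st with
  | (head, tail, matrix, k) =>
    -- matrix += head; for j in range(k+1): matrix += item; matrix += tail; matrix += "\n"
    let matrix := (PySem.List.pyRange 0 (k + 1) 1).foldl (fun m _ => m ++ [item]) (matrix ++ head)
    let matrix := matrix ++ tail ++ ['\n']
    -- head = head + item; tail = item + tail; k = k - 2
    (head ++ [item], item :: tail, matrix, k - 2)

-- A-side helper: the body of A's second loop (idx again unused)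
def pvAStep2 (st : List Char × List Char × List Char × Int) (item : Char) :
    List Char × List Char × List Char × Int :=
  match st with
  | (head, tail, matrix, k) =>
    -- matrix += head; for j in range(k): matrix += item; matrix += tail; matrix += "\n"
    let matrix := (PySem.List.pyRange 0 k 1).foldl (fun m _ => m ++ [item]) (matrix ++ head)
    let matrix := matrix ++ tail ++ ['\n']
    -- head = head[:-1]; tail = tail[1:]; k = k + 2
    (head.dropLast, tail.drop 1, matrix, k + 2)

def watch_pyramid_from_above (characters : String) : String :=
  if characters = "" then characters   -- if not characters: return characters
  else
    let cs := characters.toList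
    let reverse_str := cs.reverse.drop 1          -- (characters[::-1])[1:] (exact: reverse, then drop first)
    let n : Int := cs.length
    let s1 := cs.foldl pvAStep1 ([], [], [], 2 * n - 2)
    -- head = characters[:-1]; tail = reverse_str; k = 1
    let s2 := reverse_str.foldl pvAStep2 (cs.dropLast, reverse_str, s1.2.2.1, 1)
    String.mk s2.2.2.1.dropLast                   -- return matrix[:-1] (exact: dropLast)

-- ===== PORT B =====
-- B-side helper: the row built in one iteration of B's loop (the ring-m row)
def pvBRow (cs : List Char) (size i : Nat) : List Char :=
  let m := min i (size - 1 - i)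
  let pfx := cs.take m             -- characters[:m]
  -- pfx = prefix; prefix + characters[m] * (size - 2*m) + prefix[::-1]  (m < len, so the index is valid)
  pfx ++ List.replicate (size - 2 * m) (cs.getD m ' ') ++ pfx.reverse

def watch_pyramid_from_above_alt (characters : String) : String :=
  if characters = "" then characters   -- if not characters: return characters
  else
    let cs := characters.toList
    let size := 2 * cs.length - 1      -- size = 2*len(characters) - 1 (len ≥ 1 here, so Nat sub is exact)
    -- rows appended in a for loop over range(size) ported as a map; "\n".join(rows) at the end
    let rows := (List.range size).map (pvBRow cs size)
    String.mk (PySem.Chars.join ['\n'] rows)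

-- ===== PRECONDITION & SPEC =====
def Spec_watch_pyramid_from_above (characters : String) (out : String) : Prop := out = watch_pyramid_from_above_alt characters
instance (characters : String) (out : String) : Decidable (Spec_watch_pyramid_from_above characters out) := by unfold Spec_watch_pyramid_from_above; infer_instance

-- ===== CLAIM (what is proved, stated in full; the proofs are below) =====
def Claim_equal_watch_pyramid_from_above : Prop := ∀ (characters : String), Dom_watch_pyramid_from_above characters → Spec_watch_pyramid_from_above characters (watch_pyramid_from_above characters)

-- ===== LEMMAS AND PROOFS =====

-- the ring-m row of the pyramid seen from above
def rowL (cs : List Char) (m : Nat) : List Char :=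
  cs.take m ++ List.replicate (2 * cs.length - 1 - 2 * m) (cs.getD m ' ') ++ (cs.take m).reverse

lemma foldl_append_replicate {α : Type} (l : List α) (item : Char) (M : List Char) :
    l.foldl (fun m _ => m ++ [item]) M = M ++ List.replicate l.length item := by
  induction l generalizing M with
  | nil => simp
  | cons a t ih => simp [List.foldl_cons, ih, List.replicate_succ]

lemma inner_loop (K : Int) (item : Char) (M : List Char) :
    (PySem.List.pyRange 0 K 1).foldl (fun m _ => m ++ [item]) M
      = M ++ List.replicate K.toNat item := by
  rw [foldl_append_replicate, PySem.List.length_pyRange_one]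
  norm_num

lemma loop1_inv (cs : List Char) (suf pre M : List Char) (h : cs = pre ++ suf) :
    suf.foldl pvAStep1 (pre, pre.reverse, M, 2 * (cs.length : Int) - 2 - 2 * pre.length)
      = (cs, cs.reverse,
         M ++ ((List.range' pre.length suf.length).map (fun i => rowL cs i ++ ['\n'])).flatten,
         2 * (cs.length : Int) - 2 - 2 * cs.length) := by
  induction suf generalizing pre M with
  | nil => simp [h]
  | cons item suf' ih =>
    have hp : pre.length < cs.length := by
      rw [h, List.length_append, List.length_cons]; omega
    have hk : (2 * (cs.length : Int) - 2 - 2 * pre.length + 1).toNat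
        = 2 * cs.length - 1 - 2 * pre.length := by omega
    have htake : cs.take pre.length = pre := by simp [h]
    have hget : cs.getD pre.length ' ' = item := by
      simp [h, List.getD]
    have h2 : cs = (pre ++ [item]) ++ suf' := by simpa [List.append_assoc] using h
    rw [List.foldl_cons]
    show List.foldl pvAStep1 (pvAStep1 (pre, pre.reverse, M, _) item) suf' = _
    rw [pvAStep1]
    simp only [inner_loop]
    rw [show (item :: pre.reverse) = (pre ++ [item]).reverse by simp,
        show 2 * (cs.length : Int) - 2 - 2 * (pre.length : Int) - 2
            = 2 * (cs.length : Int) - 2 - (((pre ++ [item]).length : Nat) : Int) * 2 by push_cast; simp; ring]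
    rw [show ∀ z : Int, 2 * (cs.length : Int) - 2 - z * 2 = 2 * (cs.length : Int) - 2 - 2 * z from fun z => by ring]
    rw [ih (pre ++ [item]) _ h2]
    simp only [Prod.mk.injEq, true_and]
    rw [List.length_append, List.length_singleton, List.length_cons, List.range'_succ,
        List.map_cons, List.flatten_cons]
    simp only [rowL, htake, hget, hk]
    simp [List.append_assoc]

lemma loop2_inv (cs : List Char) (q M : List Char) (j : Nat)
    (hlen : j + q.length + 1 = cs.length)
    (hq : q = (cs.take q.length).reverse) :
    q.foldl pvAStep2 (q.reverse, q, M, 1 + 2 * (j : Int))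
      = ([], [],
         M ++ ((List.range' j q.length).map
            (fun idx => rowL cs (cs.length - 2 - idx) ++ ['\n'])).flatten,
         1 + 2 * ((j : Int) + q.length)) := by
  induction q generalizing M j with
  | nil => simp
  | cons item q' ih =>
    have hm : q'.length < cs.length := by
      rw [← hlen, List.length_cons]; omega
    have hsome : cs[q'.length]? = some (cs.getD q'.length ' ') := by
      simp [List.getD, List.getElem?_eq_getElem hm]
    have htakes : cs.take (q'.length + 1) = cs.take q'.length ++ [cs.getD q'.length ' '] := by
      rw [List.take_add_one, hsome]; rfl
    have hcons : item :: q' = cs.getD q'.length ' ' :: (cs.take q'.length).reverse := by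
      rw [hq, List.length_cons, htakes, List.reverse_append, List.reverse_singleton,
          List.singleton_append]
    have hitem : item = cs.getD q'.length ' ' := (List.cons.injEq _ _ _ _ ▸ hcons).1
    have hq1 : q' = (cs.take q'.length).reverse := (List.cons.injEq _ _ _ _ ▸ hcons).2
    have hhead : (item :: q').reverse = cs.take (q'.length + 1) := by
      rw [hq, List.reverse_reverse]; simp
    have hlen' : (j + 1) + q'.length + 1 = cs.length := by
      rw [← hlen, List.length_cons]; omega
    rw [List.foldl_cons]
    show List.foldl pvAStep2 (pvAStep2 ((item :: q').reverse, item :: q', M, _) item) q' = _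
    rw [pvAStep2]
    simp only [inner_loop]
    have hdl : (item :: q').reverse.dropLast = q'.reverse := by
      rw [List.reverse_cons, List.dropLast_concat]
    have hdrop : (item :: q').drop 1 = q' := rfl
    rw [hdl, hdrop,
        show (1 : Int) + 2 * (j : Int) + 2 = 1 + 2 * (((j + 1 : Nat) : Int)) by push_cast; ring]
    rw [ih _ (j + 1) hlen' hq1]
    have hrow : (item :: q').reverse ++ List.replicate ((1 : Int) + 2 * (j : Int)).toNat item
          ++ (item :: q') ++ ['\n'] = rowL cs (cs.length - 2 - j) ++ ['\n'] := by
      have hmj : cs.length - 2 - j = q'.length := by omega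
      have hkn : ((1 : Int) + 2 * (j : Int)).toNat = 1 + 2 * j := by omega
      have hcnt : 2 * cs.length - 1 - 2 * q'.length = 1 + ((1 + 2 * j) + 1) := by omega
      rw [hmj, rowL, hcnt, hhead, htakes, hkn, hitem, ← hq1]
      rw [show List.replicate (1 + ((1 + 2 * j) + 1)) (cs.getD q'.length ' ')
            = [cs.getD q'.length ' '] ++ List.replicate (1 + 2 * j) (cs.getD q'.length ' ')
              ++ [cs.getD q'.length ' '] by
        rw [List.replicate_add, List.replicate_add]; rfl]
      simp [List.append_assoc]
    simp only [Prod.mk.injEq, true_and, and_true]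
    constructor
    · rw [List.length_cons, List.range'_succ, List.map_cons, List.flatten_cons, ← hrow]
      simp [List.append_assoc]
    · show _ = ((1 : Int) + 2 * ((j : Int) + ((q'.length : Nat) + 1 : Nat)))
      push_cast; ring

-- B's per-row closed form is the ring row rowL
lemma pvBRow_eq_rowL (cs : List Char) (i : Nat) :
    pvBRow cs (2 * cs.length - 1) i = rowL cs (min i (2 * cs.length - 1 - 1 - i)) := by
  simp [pvBRow, rowL]

-- join with '\n' = concatenate rows each followed by '\n', then drop the final '\n'
lemma join_eq_dropLast_flatten (r : List Char) (rest : List (List Char)) :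
    PySem.Chars.join ['\n'] (r :: rest)
      = (((r :: rest).map (fun row => row ++ ['\n'])).flatten).dropLast := by
  induction rest generalizing r with
  | nil => simp [PySem.Chars.join_singleton]
  | cons r2 rest' ih =>
    have hne : ((r2 :: rest').map (fun row => row ++ ['\n'])).flatten ≠ [] := by simp
    rw [PySem.Chars.join_cons_cons, ih r2, List.map_cons (l := r2 :: rest'), List.flatten_cons,
        List.dropLast_append_of_ne_nil hne]

lemma string_ne_iff (s : String) (h : ¬ s = "") : s.toList ≠ [] := by
  intro hc
  exact h (by cases s; simp_all)

-- ===== VERDICT (by name: the statement is the Claim_ definition above) =====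
theorem watch_pyramid_from_above_spec : Claim_equal_watch_pyramid_from_above := by
  intro characters _
  unfold Spec_watch_pyramid_from_above watch_pyramid_from_above watch_pyramid_from_above_alt
  by_cases hempty : characters = ""
  · simp [hempty]
  · simp only [if_neg hempty]
    set cs := characters.toList with hcs
    have hne : cs ≠ [] := string_ne_iff characters hempty
    have hn : 1 ≤ cs.length := List.length_pos_iff.mpr hne
    -- A's first loop
    have h1 := loop1_inv cs cs [] [] (by simp)
    simp only [List.length_nil, Nat.cast_zero, List.reverse_nil, List.nil_append] at h1
    rw [show 2 * (cs.length : Int) - 2 - 2 * (0 : Int) = 2 * (cs.length : Int) - 2 by ring] at h1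
    -- A's second loop
    have hrev : cs.reverse.drop 1 = cs.dropLast.reverse := by
      rw [List.drop_one, List.tail_reverse]
    have hq : cs.reverse.drop 1 = (cs.take (cs.reverse.drop 1).length).reverse := by
      rw [hrev]
      congr 1
      rw [List.length_reverse, List.length_dropLast, List.dropLast_eq_take]
    have hqrev : (cs.reverse.drop 1).reverse = cs.dropLast := by
      rw [hrev, List.reverse_reverse]
    have h2 := loop2_inv cs (cs.reverse.drop 1)
        (((List.range' 0 cs.length).map (fun i => rowL cs i ++ ['\n'])).flatten) 0
        (by simp; omega) hq
    rw [hqrev, Nat.cast_zero] at h2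
    rw [show (1 : Int) + 2 * (0 : Int) = 1 by ring] at h2
    simp only [h1]
    rw [h2]
    -- B's rows are exactly A's rows: split the range in two at n
    have hBrows : (List.range (2 * cs.length - 1)).map (pvBRow cs (2 * cs.length - 1))
        = ((List.range' 0 cs.length).map (fun i => rowL cs i))
          ++ ((List.range' 0 (cs.length - 1)).map (fun idx => rowL cs (cs.length - 2 - idx))) := by
      rw [List.map_congr_left (fun i _ => pvBRow_eq_rowL cs i)]
      rw [List.range_eq_range', show 2 * cs.length - 1 = cs.length + (cs.length - 1) by omega]
      rw [← List.range'_append (s := 0) (m := cs.length) (n := cs.length - 1) (step := 1)]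
      rw [List.map_append]
      congr 1
      · apply List.map_congr_left
        intro i hi
        have := List.mem_range'.mp hi
        congr 1
        omega
      · rw [show (0 + 1 * cs.length) = cs.length by omega]
        rw [List.range'_eq_map_range]
        rw [List.map_map, List.range_eq_range']
        apply List.map_congr_left
        intro idx hidx
        have := List.mem_range'.mp hidx
        simp only [Function.comp]
        congr 1
        omega
    rw [hBrows]
    -- join vs dropLast of flatten
    obtain ⟨r, rest, hrr⟩ : ∃ r rest, ((List.range' 0 cs.length).map (fun i => rowL cs i))
        ++ ((List.range' 0 (cs.length - 1)).map (fun idx => rowL cs (cs.length - 2 - idx))) = r :: rest := by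
      obtain ⟨k, hk⟩ : ∃ k, cs.length = k + 1 := ⟨cs.length - 1, by omega⟩
      rw [hk, List.range'_succ, List.map_cons]
      exact ⟨_, _, rfl⟩
    rw [hrr, join_eq_dropLast_flatten]
    congr 1
    rw [← hrr]
    simp [List.flatten_append, List.map_map, Function.comp_def]
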